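-- pv_equiv track=rewrite | github.com/koskirillal/perachieve | another_try.py | strip_update
-- ===== SOURCE A (Python) =====
-- def strip_update(s: str):
--     s = s.strip()
--     a = ""
--     f = 1
--     for i in s:
--         if (i != '\n' and i != '\t'):
--             a += i
--             f = 1
--         elif (f == 1):
--             if (i == '\n'):
--                 a += '\n'
--             else:
--                 a += ' '
--             f = 0
--     return a
-- ===== SOURCE B (Python) =====
-- def strip_update(s: str):
--     s = s.strip()
--     parts = []
--     i = 0
--     n = len(s)
--     while i < n:
--         if s[i] in '\n\t':
--             parts.append('\n' if s[i] == '\n' else ' ')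
--             while i < n and s[i] in '\n\t':
--                 i += 1
--         else:
--             parts.append(s[i])
--             i += 1
--     return ''.join(parts)
-- ===== Notes on version B (the rewrite author's own statement) =====
-- stated objective: alternative
-- what changed: Replaces A's flag-carrying per-character accumulator loop with a run-skipping two-pointer scan that emits one separator per \n/\t run and skips the rest of the run directly, collecting pieces in a list joined once.
import Mathlib
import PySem

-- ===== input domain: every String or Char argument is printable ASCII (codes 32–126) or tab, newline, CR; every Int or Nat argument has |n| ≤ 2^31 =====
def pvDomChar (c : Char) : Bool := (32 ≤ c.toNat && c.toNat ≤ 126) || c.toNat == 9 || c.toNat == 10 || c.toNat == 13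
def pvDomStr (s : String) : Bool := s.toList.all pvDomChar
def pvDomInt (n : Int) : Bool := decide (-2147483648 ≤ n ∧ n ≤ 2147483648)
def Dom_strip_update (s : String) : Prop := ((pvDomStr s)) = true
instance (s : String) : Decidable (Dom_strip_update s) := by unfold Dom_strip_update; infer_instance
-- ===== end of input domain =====

-- B replaces A's flag-carrying per-character loop with a run-skipping two-pointer scan (alternative decomposition; return value only).


-- ===== PORT A =====
-- A's loop: accumulator a, flag f, one character at a time, branches in A's order.
def stripUpdateLoopA : List Char → List Char → Int → List Char
  | [], a, _ => a
  | c :: t, a, f =>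
    if c ≠ '\n' ∧ c ≠ '\t' then stripUpdateLoopA t (a ++ [c]) 1
    else if f = 1 then
      if c = '\n' then stripUpdateLoopA t (a ++ ['\n']) 0
      else stripUpdateLoopA t (a ++ [' ']) 0
    else stripUpdateLoopA t a f

def strip_update (s : String) : String :=
  String.ofList (stripUpdateLoopA (PySem.Chars.strip s.toList) [] 1)

-- ===== PORT B =====
-- B's `s[i] in '\n\t'` test
def stripUpdateSep (c : Char) : Bool := c = '\n' || c = '\t'

-- B's while loop: on a separator emit one replacement and skip the rest of the run (the inner while).
def stripUpdateLoopB : List Char → List Char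
  | [] => []
  | c :: t =>
    if stripUpdateSep c then
      (if c = '\n' then '\n' else ' ') :: stripUpdateLoopB (t.dropWhile stripUpdateSep)
    else c :: stripUpdateLoopB t
  termination_by l => l.length
  decreasing_by
  · exact Nat.lt_succ_of_le (List.length_dropWhile_le _ _)
  · simp

def strip_update_alt (s : String) : String :=
  String.ofList (stripUpdateLoopB (PySem.Chars.strip s.toList))

-- ===== PRECONDITION & SPEC =====
def Spec_strip_update (s : String) (out : String) : Prop := out = strip_update_alt s
instance (s : String) (out : String) : Decidable (Spec_strip_update s out) := by unfold Spec_strip_update; infer_instance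

-- ===== CLAIM (what is proved, stated in full; the proofs are below) =====
def Claim_equal_strip_update : Prop := ∀ (s : String), Dom_strip_update s → Spec_strip_update s (strip_update s)

-- ===== LEMMAS AND PROOFS =====

-- With f = 0, A skips separators until the first ordinary character; that is exactly dropWhile.
theorem loopA_zero (l : List Char) (a : List Char) :
    stripUpdateLoopA l a 0 = stripUpdateLoopA (l.dropWhile stripUpdateSep) a 1 := by
  induction l with
  | nil => simp [stripUpdateLoopA]
  | cons c t ih =>
    by_cases h : c ≠ '\n' ∧ c ≠ '\t'
    · have hs : stripUpdateSep c = false := by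
        simp [stripUpdateSep, h.1, h.2]
      simp [stripUpdateLoopA, h, hs]
    · have hs : stripUpdateSep c = true := by
        simp [stripUpdateSep]
        rcases not_and_or.mp h with h1 | h1
        · left; simpa using h1
        · right; simpa using h1
      simp [stripUpdateLoopA, h, hs, ih]

-- With f = 1, A's remaining output is exactly B's scan of the remaining input.
theorem loopA_one : ∀ (n : Nat) (l : List Char), l.length ≤ n → ∀ (a : List Char),
    stripUpdateLoopA l a 1 = a ++ stripUpdateLoopB l := by
  intro n
  induction n with
  | zero =>
    intro l hl a
    have : l = [] := List.eq_nil_of_length_eq_zero (Nat.le_zero.mp hl)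
    subst this; simp [stripUpdateLoopA, stripUpdateLoopB]
  | succ n ih =>
    intro l hl a
    cases l with
    | nil => simp [stripUpdateLoopA, stripUpdateLoopB]
    | cons c t =>
      have ht : t.length ≤ n := Nat.lt_succ_iff.mp (by simpa using hl)
      by_cases h : c ≠ '\n' ∧ c ≠ '\t'
      · have hs : stripUpdateSep c = false := by
          simp [stripUpdateSep, h.1, h.2]
        simp [stripUpdateLoopA, h, stripUpdateLoopB, hs, ih t ht]
      · have hs : stripUpdateSep c = true := by
          simp [stripUpdateSep]
          rcases not_and_or.mp h with h1 | h1
          · left; simpa using h1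
          · right; simpa using h1
        have hd : (t.dropWhile stripUpdateSep).length ≤ n :=
          le_trans (List.length_dropWhile_le _ _) ht
        by_cases hn : c = '\n'
        · subst hn
          rw [show stripUpdateLoopA ('\n' :: t) a 1 = stripUpdateLoopA t (a ++ ['\n']) 0 from by
            simp [stripUpdateLoopA]]
          rw [loopA_zero, ih _ hd]
          simp [stripUpdateLoopB, stripUpdateSep]
        · have hc : c = '\t' := by
            rcases not_and_or.mp h with h1 | h1
            · exact absurd (not_not.mp h1) hn
            · exact not_not.mp h1
          subst hc
          rw [show stripUpdateLoopA ('\t' :: t) a 1 = stripUpdateLoopA t (a ++ [' ']) 0 from by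
            simp [stripUpdateLoopA]]
          rw [loopA_zero, ih _ hd]
          simp [stripUpdateLoopB, stripUpdateSep]

-- ===== VERDICT (by name: the statement is the Claim_ definition above) =====
theorem strip_update_spec : Claim_equal_strip_update := by
  intro s _
  unfold Spec_strip_update strip_update strip_update_alt
  rw [loopA_one (PySem.Chars.strip s.toList).length _ le_rfl]
  simp
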